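-- pv_equiv track=rewrite | github.com/lucas7bm/ret-lafeber | Ajustes RET Lafeber.py | insert_9900_counter
-- ===== SOURCE A (Python) =====
-- def insert_9900_counter(efd_array, reg):
--     # Caso o contador do registro 9900 não exista, o inserimos
--     has_counter = False
--     for row in efd_array:
--         if row[0] == '9900' and row[1] == reg:
--             has_counter = True
--     if has_counter:
--         return efd_array
--     for i in range(len(efd_array)):
--         if efd_array[i][0] == '9900' and efd_array[i][1] > reg:
--             efd_array = efd_array[:i] + [['9900', reg, '1']] + efd_array[i:]
--             break
--     return efd_array
-- ===== SOURCE B (Python) =====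
-- def insert_9900_counter(efd_array, reg):
--     # Recursive decomposition: an existence recursion, then a structural
--     # rebuild that conses the new row in front of the first greater 9900 row.
--     if _has_counter(efd_array, reg):
--         return efd_array
--     return _insert_before_greater(efd_array, reg)
--
-- def _has_counter(rows, reg):
--     if not rows:
--         return False
--     return (rows[0][0] == '9900' and rows[0][1] == reg) or _has_counter(rows[1:], reg)
--
-- def _insert_before_greater(rows, reg):
--     if not rows:
--         return []
--     head = rows[0]
--     if head[0] == '9900' and head[1] > reg:
--         return [['9900', reg, '1']] + rows
--     return [head] + _insert_before_greater(rows[1:], reg)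
-- ===== Notes on version B (the rewrite author's own statement) =====
-- stated objective: alternative
-- what changed: Replaces A's flag-accumulating loop and indexed slice-splicing loop by two structural recursions: an existence recursion on the list and a rebuild recursion that conses rows until it reaches the first greater 9900 row, where it conses the new row in front of the remainder.
-- outside the precondition, e.g. on insert_9900_counter([[]], 'X'): A raises IndexError, B raises IndexError; on insert_9900_counter([['9900']], 'X'): A raises IndexError, B raises IndexError
import Mathlib
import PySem

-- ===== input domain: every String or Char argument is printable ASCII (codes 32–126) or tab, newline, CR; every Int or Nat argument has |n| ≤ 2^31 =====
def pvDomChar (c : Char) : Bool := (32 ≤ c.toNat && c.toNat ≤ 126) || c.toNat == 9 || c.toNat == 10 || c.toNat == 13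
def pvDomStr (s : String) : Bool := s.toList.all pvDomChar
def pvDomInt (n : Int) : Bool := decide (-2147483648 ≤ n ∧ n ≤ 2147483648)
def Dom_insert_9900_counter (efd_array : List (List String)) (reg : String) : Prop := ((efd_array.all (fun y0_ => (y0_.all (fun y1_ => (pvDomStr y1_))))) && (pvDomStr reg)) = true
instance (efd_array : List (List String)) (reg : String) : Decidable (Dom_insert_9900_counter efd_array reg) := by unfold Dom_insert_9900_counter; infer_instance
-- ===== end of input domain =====

-- B replaces A's flag loop + indexed splice loop by two structural recursions (existence,
-- then a cons-rebuilding insert); neither mutates its input (A rebinds, never mutates),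
-- so return-value equivalence is the whole story. Objective: alternative decomposition.

-- ===== PORT A =====
-- second loop of A: 'for i in range(len(efd_array)): if …: efd_array = efd_array[:i] + [[…]] + efd_array[i:]; break'
def pvLoopA (reg : String) (orig : List (List String)) : List (List String) → Nat → List (List String)
  | [], _ => orig
  | row :: rest, i =>
    if (PySem.List.pyGet? row 0).getD "" == "9900" && decide (reg < (PySem.List.pyGet? row 1).getD "") then
      PySem.List.slice orig none (some (i : Int)) ++ [["9900", reg, "1"]] ++ PySem.List.slice orig (some (i : Int)) none
    else pvLoopA reg orig rest (i + 1)

def insert_9900_counter (efd_array : List (List String)) (reg : String) : List (List String) :=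
  let has_counter := efd_array.foldl
    (fun hc row =>
      if (PySem.List.pyGet? row 0).getD "" == "9900" && (PySem.List.pyGet? row 1).getD "" == reg
      then true else hc) false
  if has_counter then efd_array
  else pvLoopA reg efd_array efd_array 0

-- ===== PORT B =====
-- Source B's _has_counter: structural recursion testing rows[0], recursing on rows[1:]
def pvHasCounter (reg : String) : List (List String) → Bool
  | [] => false
  | row :: rest =>
    ((PySem.List.pyGet? row 0).getD "" == "9900" && (PySem.List.pyGet? row 1).getD "" == reg)
      || pvHasCounter reg rest

-- Source B's _insert_before_greater: rebuild by cons, insert in front of the first greater 9900 row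
def pvInsertBeforeGreater (reg : String) : List (List String) → List (List String)
  | [] => []
  | head :: rest =>
    if (PySem.List.pyGet? head 0).getD "" == "9900" && decide (reg < (PySem.List.pyGet? head 1).getD "") then
      ["9900", reg, "1"] :: head :: rest
    else head :: pvInsertBeforeGreater reg rest

def insert_9900_counter_alt (efd_array : List (List String)) (reg : String) : List (List String) :=
  if pvHasCounter reg efd_array then efd_array
  else pvInsertBeforeGreater reg efd_array

-- ===== PRECONDITION & SPEC =====
-- Pre_ excludes exactly the inputs where the Python raises IndexError: an empty row
-- (row[0] is always read), or a one-element row ['9900'] (row[1] is read whenever row[0] == '9900').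
def Pre_insert_9900_counter (efd_array : List (List String)) (reg : String) : Prop :=
  ∀ row ∈ efd_array, row ≠ [] ∧ (PySem.List.pyGet? row 0 = some "9900" → 2 ≤ row.length)
instance (efd_array : List (List String)) (reg : String) : Decidable (Pre_insert_9900_counter efd_array reg) := by unfold Pre_insert_9900_counter; infer_instance

def pvWitness_insert_9900_counter : List (List String) × String := ([["9900", "B", "1"], ["0100", "A", "1"]], "A")

def Spec_insert_9900_counter (efd_array : List (List String)) (reg : String) (out : List (List String)) : Prop := out = insert_9900_counter_alt efd_array reg
instance (efd_array : List (List String)) (reg : String) (out : List (List String)) : Decidable (Spec_insert_9900_counter efd_array reg out) := by unfold Spec_insert_9900_counter; infer_instance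

-- ===== CLAIM =====
def Claim_equal_insert_9900_counter : Prop := ∀ (efd_array : List (List String)) (reg : String), Dom_insert_9900_counter efd_array reg → Pre_insert_9900_counter efd_array reg → Spec_insert_9900_counter efd_array reg (insert_9900_counter efd_array reg)

-- ===== LEMMAS AND PROOFS =====

def pvIsCnt (reg : String) (row : List String) : Bool :=
  (PySem.List.pyGet? row 0).getD "" == "9900" && (PySem.List.pyGet? row 1).getD "" == reg

def pvIsIns (reg : String) (row : List String) : Bool :=
  (PySem.List.pyGet? row 0).getD "" == "9900" && decide (reg < (PySem.List.pyGet? row 1).getD "")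

theorem pv_foldA_eq_any (reg : String) (l : List (List String)) (b : Bool) :
    l.foldl (fun hc row =>
      if (PySem.List.pyGet? row 0).getD "" == "9900" && (PySem.List.pyGet? row 1).getD "" == reg
      then true else hc) b = (b || l.any (pvIsCnt reg)) := by
  induction l generalizing b with
  | nil => simp
  | cons row rest ih =>
    simp only [List.foldl_cons, List.any_cons, ih]
    by_cases h : ((PySem.List.pyGet? row 0).getD "" == "9900" && (PySem.List.pyGet? row 1).getD "" == reg) = true
    · have hcnt : pvIsCnt reg row = true := h
      rw [if_pos h, hcnt]; simp
    · have hcnt : pvIsCnt reg row = false := Bool.eq_false_iff.mpr h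
      rw [if_neg h, hcnt]; simp

theorem pv_hasCounter_eq_any (reg : String) (l : List (List String)) :
    pvHasCounter reg l = l.any (pvIsCnt reg) := by
  induction l with
  | nil => rfl
  | cons row rest ih => simp only [pvHasCounter, List.any_cons, ih]; rfl

theorem pv_loopA_eq (reg : String) (orig : List (List String)) (l : List (List String)) (i : Nat) :
    pvLoopA reg orig l i =
      match l.findIdx? (pvIsIns reg) with
      | none => orig
      | some j => PySem.List.slice orig none (some ((i + j : Nat) : Int)) ++ [["9900", reg, "1"]] ++ PySem.List.slice orig (some ((i + j : Nat) : Int)) none := by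
  induction l generalizing i with
  | nil => simp [pvLoopA]
  | cons row rest ih =>
    by_cases h : ((PySem.List.pyGet? row 0).getD "" == "9900" && decide (reg < (PySem.List.pyGet? row 1).getD "")) = true
    · have hins : pvIsIns reg row = true := h
      simp only [pvLoopA]
      rw [List.findIdx?_cons, if_pos h, if_pos hins]
      simp
    · have hins : pvIsIns reg row = false := Bool.eq_false_iff.mpr h
      simp only [pvLoopA]
      rw [List.findIdx?_cons, if_neg h, if_neg (show ¬ pvIsIns reg row = true from h), ih]
      cases hx : rest.findIdx? (pvIsIns reg) with
      | none => rfl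
      | some j =>
        simp only [Option.map_some]
        have : i + 1 + j = i + (j + 1) := by omega
        rw [this]

theorem pv_insert_eq (reg : String) (l : List (List String)) :
    pvInsertBeforeGreater reg l =
      match l.findIdx? (pvIsIns reg) with
      | none => l
      | some j => l.take j ++ [["9900", reg, "1"]] ++ l.drop j := by
  induction l with
  | nil => rfl
  | cons row rest ih =>
    by_cases h : ((PySem.List.pyGet? row 0).getD "" == "9900" && decide (reg < (PySem.List.pyGet? row 1).getD "")) = true
    · have hins : pvIsIns reg row = true := h
      simp only [pvInsertBeforeGreater]
      rw [List.findIdx?_cons, if_pos h, if_pos hins]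
      simp
    · have hins : pvIsIns reg row = false := Bool.eq_false_iff.mpr h
      simp only [pvInsertBeforeGreater]
      rw [List.findIdx?_cons, if_neg h, if_neg (show ¬ pvIsIns reg row = true from h), ih]
      cases hx : rest.findIdx? (pvIsIns reg) with
      | none => rfl
      | some j => simp

theorem pv_AB (efd_array : List (List String)) (reg : String) :
    insert_9900_counter efd_array reg = insert_9900_counter_alt efd_array reg := by
  unfold insert_9900_counter insert_9900_counter_alt
  rw [pv_foldA_eq_any, pv_hasCounter_eq_any]
  simp only [Bool.false_or]
  by_cases hc : efd_array.any (pvIsCnt reg) = true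
  · rw [if_pos hc, if_pos hc]
  · rw [if_neg hc, if_neg hc, pv_loopA_eq, pv_insert_eq]
    cases hf : efd_array.findIdx? (pvIsIns reg) with
    | none => rfl
    | some j =>
      simp only [Nat.zero_add]
      rw [PySem.List.slice_to_natCast, PySem.List.slice_from_natCast]

-- ===== VERDICT =====
theorem insert_9900_counter_spec : Claim_equal_insert_9900_counter := by
  intro efd_array reg _ _
  unfold Spec_insert_9900_counter
  exact pv_AB efd_array reg
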